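-- pv_equiv track=rewrite | github.com/raverkamp/intellisense | intellisense.py | find_alias_pairs
-- ===== SOURCE A (Python) =====
-- def wordchar(c):
--     return c.lower() in "abcdefghijklmnopqrstuvwxyz1234567890_$#"
--
-- def next_non_ws(text, pos):
--     while pos < len(text) and text[pos].isspace():
--         pos = pos + 1
--     return pos
--
-- def next_word(text, pos):
--     while True:
--         if pos >=len(text):
--             return None
--         if wordchar(text[pos]):
--             return pos
--         pos = pos + 1
--
-- def word_end(text, pos):
--     if pos >= len(text) or not wordchar(text[pos]):
--         return pos
--     else:
--         return word_end(text, pos+1)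
--
-- def find_alias_pairs(text):
--     # find text whitespace word
--     res = []
--     pos = 0
--     while True:
--         pos2 = next_word(text,pos)
--         if pos2 is None:
--             return res
--         # pos2 is start of word
--         pos3 = word_end(text, pos2)
--         # pos3 is position after word
--         if pos3 >= len(text) or not text[pos3].isspace():
--             pos = pos3
--             continue
--         pos4 = next_non_ws(text, pos3)
--         if pos4 >= len(text):
--             return res
--         if wordchar(text[pos4]):
--             pos5 = word_end(text, pos4)
--             res.append((text[pos4:pos5],text[pos2:pos3]))
--             pos = pos4
--         else:
--             pos = pos4
-- ===== SOURCE B (Python) =====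
-- def wordchar(c):
--     return c.lower() in "abcdefghijklmnopqrstuvwxyz1234567890_$#"
--
-- def find_alias_pairs(text):
--     # Two passes: collect maximal word spans, then pair consecutive spans
--     # whose gap is pure whitespace.
--     n = len(text)
--     spans = []
--     i = 0
--     while i < n:
--         if wordchar(text[i]):
--             j = i
--             while j < n and wordchar(text[j]):
--                 j = j + 1
--             spans.append((i, j))
--             i = j
--         else:
--             i = i + 1
--     return [(text[s2:e2], text[s1:e1])
--             for (s1, e1), (s2, e2) in zip(spans, spans[1:])
--             if text[e1:s2].isspace()]
-- ===== Notes on version B (the rewrite author's own statement) =====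
-- stated objective: simpler
-- what changed: A's single interleaved scan that restarts word/whitespace searches from shifting positions is replaced by two clean passes: collect all maximal word spans once, then pair consecutive spans whose separating gap is pure whitespace.
import Mathlib
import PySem

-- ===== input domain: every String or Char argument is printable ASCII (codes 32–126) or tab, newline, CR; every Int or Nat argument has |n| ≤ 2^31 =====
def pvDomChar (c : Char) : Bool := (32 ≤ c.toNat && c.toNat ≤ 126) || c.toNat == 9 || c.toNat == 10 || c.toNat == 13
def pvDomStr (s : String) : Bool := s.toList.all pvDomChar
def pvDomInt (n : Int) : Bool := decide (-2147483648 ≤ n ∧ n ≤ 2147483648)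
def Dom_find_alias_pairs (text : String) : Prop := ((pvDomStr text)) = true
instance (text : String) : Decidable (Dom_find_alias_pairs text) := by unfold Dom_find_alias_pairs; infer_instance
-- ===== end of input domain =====

-- B replaces A's single interleaved scan (word / whitespace / word with restarts) by two passes:
-- collect maximal word spans once, then pair consecutive spans whose gap is pure whitespace (simpler decomposition, same cost).

-- ===== PORT A =====
-- shared helper: Python 'wordchar' (used verbatim by both A and B)
def wordcharA (c : Char) : Bool :=
  PySem.Chars.isIn (PySem.Chars.lower [c]) (String.toList "abcdefghijklmnopqrstuvwxyz1234567890_$#")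

def nextNonWs (cs : List Char) (pos : Nat) : Nat :=
  if h : pos < cs.length ∧ PySem.Chars.isspace (cs.getD pos ' ') = true then
    nextNonWs cs (pos + 1)
  else pos
termination_by cs.length - pos
decreasing_by omega

def nextWord? (cs : List Char) (pos : Nat) : Option Nat :=
  if h : pos ≥ cs.length then none
  else if wordcharA (cs.getD pos ' ') then some pos
  else nextWord? cs (pos + 1)
termination_by cs.length - pos
decreasing_by omega

def wordEnd (cs : List Char) (pos : Nat) : Nat :=
  if h : pos ≥ cs.length ∨ ¬ wordcharA (cs.getD pos ' ') = true then pos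
  else wordEnd cs (pos + 1)
termination_by cs.length - pos
decreasing_by omega

-- facts fapLoop's termination cites
theorem nextWord?_some (cs : List Char) (pos p : Nat) (h : nextWord? cs pos = some p) :
    pos ≤ p ∧ p < cs.length ∧ wordcharA (cs.getD p ' ') = true := by
  fun_induction nextWord? cs pos with
  | case1 pos h' => simp at h
  | case2 pos h' hw => simp_all
  | case3 pos h' hw ih => have := ih h; exact ⟨by omega, this.2⟩

theorem le_wordEnd (cs : List Char) (p : Nat) : p ≤ wordEnd cs p := by
  fun_induction wordEnd cs p with
  | case1 => omega
  | case2 pos h ih => omega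

theorem lt_wordEnd (cs : List Char) (p : Nat) (h1 : p < cs.length)
    (h2 : wordcharA (cs.getD p ' ') = true) : p < wordEnd cs p := by
  rw [wordEnd]
  have h3 : ¬ (p ≥ cs.length ∨ ¬ wordcharA (cs.getD p ' ') = true) := by
    simp only [not_or, not_not, not_le]; exact ⟨by omega, h2⟩
  rw [dif_neg h3]
  have := le_wordEnd cs (p + 1); omega

theorem le_nextNonWs (cs : List Char) (p : Nat) : p ≤ nextNonWs cs p := by
  fun_induction nextNonWs cs p with
  | case1 pos h ih => omega
  | case2 => omega

def fapLoop (cs : List Char) (pos : Nat) (res : List (String × String)) :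
    List (String × String) :=
  match h2 : nextWord? cs pos with
  | none => res
  | some pos2 =>
    if _h3 : wordEnd cs pos2 ≥ cs.length ∨ ¬ PySem.Chars.isspace (cs.getD (wordEnd cs pos2) ' ') = true then
      fapLoop cs (wordEnd cs pos2) res
    else
      if _h4 : nextNonWs cs (wordEnd cs pos2) ≥ cs.length then res
      else if _h5 : wordcharA (cs.getD (nextNonWs cs (wordEnd cs pos2)) ' ') = true then
        fapLoop cs (nextNonWs cs (wordEnd cs pos2))
          (res ++ [(String.ofList (PySem.List.slice cs (some (nextNonWs cs (wordEnd cs pos2) : Int))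
                      (some (wordEnd cs (nextNonWs cs (wordEnd cs pos2)) : Int))),
                    String.ofList (PySem.List.slice cs (some (pos2 : Int)) (some (wordEnd cs pos2 : Int))))])
      else fapLoop cs (nextNonWs cs (wordEnd cs pos2)) res
termination_by cs.length - pos
decreasing_by
  · have h := nextWord?_some cs pos pos2 h2
    have h3 := lt_wordEnd cs pos2 h.2.1 h.2.2
    omega
  · have h := nextWord?_some cs pos pos2 h2
    have h3 := lt_wordEnd cs pos2 h.2.1 h.2.2
    have h4 := le_nextNonWs cs (wordEnd cs pos2)
    omega
  · have h := nextWord?_some cs pos pos2 h2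
    have h3 := lt_wordEnd cs pos2 h.2.1 h.2.2
    have h4 := le_nextNonWs cs (wordEnd cs pos2)
    omega

def find_alias_pairs (text : String) : List (String × String) :=
  fapLoop text.toList 0 []

-- ===== PORT B =====
def spanEnd (cs : List Char) (j : Nat) : Nat :=
  if h : j < cs.length ∧ wordcharA (cs.getD j ' ') = true then spanEnd cs (j + 1) else j
termination_by cs.length - j
decreasing_by omega

theorem le_spanEnd (cs : List Char) (j : Nat) : j ≤ spanEnd cs j := by
  fun_induction spanEnd cs j with
  | case1 pos h ih => omega
  | case2 => omega

theorem lt_spanEnd (cs : List Char) (j : Nat) (h1 : j < cs.length)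
    (h2 : wordcharA (cs.getD j ' ') = true) : j < spanEnd cs j := by
  rw [spanEnd, dif_pos ⟨h1, h2⟩]
  have := le_spanEnd cs (j + 1); omega

def spansLoop (cs : List Char) (i : Nat) (spans : List (Nat × Nat)) : List (Nat × Nat) :=
  if h : i < cs.length then
    if hw : wordcharA (cs.getD i ' ') = true then
      spansLoop cs (spanEnd cs i) (spans ++ [(i, spanEnd cs i)])
    else spansLoop cs (i + 1) spans
  else spans
termination_by cs.length - i
decreasing_by
  · have := lt_spanEnd cs i h hw; omega
  · omega

def pairsOf (cs : List Char) (spans : List (Nat × Nat)) : List (String × String) :=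
  ((spans.zip spans.tail).filter (fun p =>
      PySem.Chars.strIsspace (PySem.List.slice cs (some (p.1.2 : Int)) (some (p.2.1 : Int))))).map
    (fun p => (String.ofList (PySem.List.slice cs (some (p.2.1 : Int)) (some (p.2.2 : Int))),
               String.ofList (PySem.List.slice cs (some (p.1.1 : Int)) (some (p.1.2 : Int)))))

def find_alias_pairs_alt (text : String) : List (String × String) :=
  pairsOf text.toList (spansLoop text.toList 0 [])

-- ===== PRECONDITION & SPEC =====
def Spec_find_alias_pairs (text : String) (out : List (String × String)) : Prop := out = find_alias_pairs_alt text
instance (text : String) (out : List (String × String)) : Decidable (Spec_find_alias_pairs text out) := by unfold Spec_find_alias_pairs; infer_instance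

-- ===== CLAIM (what is proved, stated in full; the proofs are below) =====
def Claim_equal_find_alias_pairs : Prop := ∀ (text : String), Dom_find_alias_pairs text → Spec_find_alias_pairs text (find_alias_pairs text)

-- ===== LEMMAS AND PROOFS =====


-- spansLoop with a non-empty accumulator just prepends it
theorem spansLoop_append (cs : List Char) : ∀ (k i : Nat) (acc : List (Nat × Nat)),
    cs.length - i ≤ k → spansLoop cs i acc = acc ++ spansLoop cs i [] := by
  intro k
  induction k with
  | zero =>
    intro i acc h
    have h1 : ¬ i < cs.length := by omega
    rw [spansLoop.eq_def]
    conv_rhs => rw [spansLoop.eq_def]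
    simp [h1]
  | succ k ih =>
    intro i acc h
    rw [spansLoop.eq_def]
    conv_rhs => rw [spansLoop.eq_def]
    by_cases h1 : i < cs.length
    · simp only [dif_pos h1]
      by_cases hw : wordcharA (cs.getD i ' ') = true
      · simp only [dif_pos hw]
        have hs := lt_spanEnd cs i h1 hw
        rw [ih (spanEnd cs i) (acc ++ [(i, spanEnd cs i)]) (by omega),
            ih (spanEnd cs i) ([] ++ [(i, spanEnd cs i)]) (by omega)]
        simp
      · simp only [dif_neg hw]
        rw [ih (i + 1) acc (by omega), ih (i + 1) [] (by omega)]
    · simp [h1]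

theorem spans_stop (cs : List Char) (i : Nat) (h : ¬ i < cs.length) :
    spansLoop cs i [] = [] := by
  rw [spansLoop.eq_def]; simp [h]

theorem spans_word (cs : List Char) (i : Nat) (h : i < cs.length)
    (hw : wordcharA (cs.getD i ' ') = true) :
    spansLoop cs i [] = (i, spanEnd cs i) :: spansLoop cs (spanEnd cs i) [] := by
  rw [spansLoop.eq_def]
  simp only [dif_pos h, dif_pos hw]
  rw [spansLoop_append cs cs.length (spanEnd cs i) _ (by omega)]
  simp

theorem spans_skip (cs : List Char) (i : Nat) (h : i < cs.length)
    (hw : wordcharA (cs.getD i ' ') = false) :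
    spansLoop cs i [] = spansLoop cs (i + 1) [] := by
  rw [spansLoop.eq_def]
  simp only [dif_pos h]
  rw [dif_neg (by rw [Bool.not_eq_true]; exact hw)]

theorem wordEnd_eq_spanEnd (cs : List Char) (p : Nat) : wordEnd cs p = spanEnd cs p := by
  fun_induction wordEnd cs p with
  | case1 p h =>
    rw [spanEnd]
    rw [dif_neg]
    rintro ⟨h1, h2⟩
    rcases h with h | h
    · omega
    · exact h h2
  | case2 p h ih =>
    have h' := not_or.mp h
    rw [spanEnd, dif_pos ⟨by omega, by simpa using h'.2⟩]
    exact ih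

theorem nextWord?_none_spans (cs : List Char) (pos : Nat) (h : nextWord? cs pos = none) :
    spansLoop cs pos [] = [] := by
  fun_induction nextWord? cs pos with
  | case1 pos h1 => exact spans_stop cs pos (by omega)
  | case2 pos h1 hw => simp at h
  | case3 pos h1 hw ih =>
    rw [spans_skip cs pos (by omega) (by simpa using hw)]
    exact ih h

theorem nextWord?_some_spans (cs : List Char) (pos p : Nat) (h : nextWord? cs pos = some p) :
    spansLoop cs pos [] = spansLoop cs p [] := by
  fun_induction nextWord? cs pos with
  | case1 pos h1 => simp at h
  | case2 pos h1 hw =>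
    have : pos = p := by simpa using h
    rw [this]
  | case3 pos h1 hw ih =>
    rw [spans_skip cs pos (by omega) (by simpa using hw)]
    exact ih h

theorem nextNonWs_ws (cs : List Char) (pos : Nat) :
    ∀ j, pos ≤ j → j < nextNonWs cs pos → PySem.Chars.isspace (cs.getD j ' ') = true := by
  fun_induction nextNonWs cs pos with
  | case1 pos h ih =>
    intro j hj1 hj2
    by_cases hj : j = pos
    · rw [hj]; exact h.2
    · exact ih j (by omega) hj2
  | case2 pos h => intro j h1 h2; omega

theorem nextNonWs_stop (cs : List Char) (pos : Nat) :
    nextNonWs cs pos ≥ cs.length ∨ PySem.Chars.isspace (cs.getD (nextNonWs cs pos) ' ') = false := by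
  fun_induction nextNonWs cs pos with
  | case1 pos h ih => exact ih
  | case2 pos h =>
    by_cases h1 : pos < cs.length
    · right
      rcases not_and_or.mp h with h2 | h2
      · omega
      · simpa using h2
    · left; omega

theorem lt_nextNonWs (cs : List Char) (p : Nat) (h1 : p < cs.length)
    (h2 : PySem.Chars.isspace (cs.getD p ' ') = true) : p < nextNonWs cs p := by
  rw [nextNonWs, dif_pos ⟨h1, h2⟩]
  have := le_nextNonWs cs (p + 1); omega

theorem spanEnd_stop (cs : List Char) (j : Nat) :
    spanEnd cs j ≥ cs.length ∨ wordcharA (cs.getD (spanEnd cs j) ' ') = false := by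
  fun_induction spanEnd cs j with
  | case1 pos h ih => exact ih
  | case2 pos h =>
    by_cases h1 : pos < cs.length
    · right
      rcases not_and_or.mp h with h2 | h2
      · omega
      · simpa using h2
    · left; omega

-- a whitespace character is never a word character
theorem isspace_not_wordchar (c : Char) (h : PySem.Chars.isspace c = true) :
    wordcharA c = false := by
  have hn : c.toNat = 32 ∨ (9 ≤ c.toNat ∧ c.toNat ≤ 13) ∨ (28 ≤ c.toNat ∧ c.toNat ≤ 31) ∨
      c.toNat = 133 ∨ c.toNat = 160 ∨ c.toNat = 5760 ∨ (8192 ≤ c.toNat ∧ c.toNat ≤ 8202) ∨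
      c.toNat = 8232 ∨ c.toNat = 8233 ∨ c.toNat = 8239 ∨ c.toNat = 8287 ∨ c.toNat = 12288 := by
    simp [PySem.Chars.isspace] at h
    tauto
  have hup : PySem.Chars.isupper c = false := by
    simp only [PySem.Chars.isupper]
    rw [Bool.and_eq_false_iff]
    by_cases hA : 'A' ≤ c
    · right
      simp only [decide_eq_false_iff_not, not_le]
      simp only [Char.le_def, Char.reduceVal, UInt32.le_iff_toNat_le, UInt32.reduceToNat] at hA
      have hA' : 65 ≤ c.toNat := hA
      by_contra hZ
      simp only [not_lt, Char.le_def, Char.reduceVal, UInt32.le_iff_toNat_le,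
        UInt32.reduceToNat] at hZ
      have hZ' : c.toNat ≤ 90 := hZ
      omega
    · left; simpa using hA
  have hl : PySem.Chars.lowerChar c = c := by
    unfold PySem.Chars.lowerChar
    rw [hup]; simp
  by_contra hC
  rw [Bool.not_eq_false] at hC
  unfold wordcharA at hC
  rw [PySem.Chars.isIn_iff_infix] at hC
  simp only [PySem.Chars.lower, List.map] at hC
  rw [hl] at hC
  have hmem : c ∈ (String.toList "abcdefghijklmnopqrstuvwxyz1234567890_$#") :=
    List.singleton_sublist.mp hC.sublist
  have hpat : String.toList "abcdefghijklmnopqrstuvwxyz1234567890_$#" =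
      ['a','b','c','d','e','f','g','h','i','j','k','l','m','n','o','p','q','r','s','t',
       'u','v','w','x','y','z','1','2','3','4','5','6','7','8','9','0','_','$','#'] := rfl
  rw [hpat] at hmem
  fin_cases hmem <;> simp [PySem.Chars.isspace] at h

theorem mem_slice_of_lt (cs : List Char) (a b j : Nat) (h1 : a ≤ j) (h2 : j < b)
    (h3 : j < cs.length) :
    cs.getD j ' ' ∈ PySem.List.slice cs (some (a : Int)) (some (b : Int)) := by
  rw [PySem.List.slice_natCast]
  refine List.mem_iff_getElem.mpr ⟨j - a, ?_, ?_⟩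
  · simp [List.length_take, List.length_drop]; omega
  · rw [List.getElem_take, List.getElem_drop]
    have hj : a + (j - a) = j := by omega
    rw [List.getD_eq_getElem cs ' ' h3]
    congr 1

theorem strIsspace_slice_true (cs : List Char) (a b : Nat) (h1 : a < b) (h2 : b ≤ cs.length)
    (hall : ∀ j, a ≤ j → j < b → PySem.Chars.isspace (cs.getD j ' ') = true) :
    PySem.Chars.strIsspace (PySem.List.slice cs (some (a : Int)) (some (b : Int))) = true := by
  rw [PySem.List.slice_natCast]
  unfold PySem.Chars.strIsspace
  rw [Bool.and_eq_true]
  constructor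
  · rw [Bool.not_eq_eq_eq_not, Bool.not_true, List.isEmpty_eq_false_iff, ← List.length_pos_iff]
    simp [List.length_take, List.length_drop]; omega
  · rw [List.all_eq_true]
    intro x hx
    rcases List.mem_iff_getElem.mp hx with ⟨i, hi, hx⟩
    have hi' : i < b - a ∧ a + i < cs.length := by
      simp [List.length_take, List.length_drop] at hi; omega
    rw [List.getElem_take, List.getElem_drop] at hx
    have := hall (a + i) (by omega) (by omega)
    rw [List.getD_eq_getElem cs ' ' (by omega)] at this
    rw [hx] at this
    exact this

theorem strIsspace_slice_false (cs : List Char) (a b j : Nat) (h1 : a ≤ j) (h2 : j < b)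
    (h3 : j < cs.length) (hj : PySem.Chars.isspace (cs.getD j ' ') = false) :
    PySem.Chars.strIsspace (PySem.List.slice cs (some (a : Int)) (some (b : Int))) = false := by
  unfold PySem.Chars.strIsspace
  rw [Bool.and_eq_false_iff]
  right
  rw [List.all_eq_false]
  refine ⟨_, mem_slice_of_lt cs a b j h1 h2 h3, ?_⟩
  simp only [hj]
  simp

theorem pairsOf_nil (cs : List Char) : pairsOf cs [] = [] := rfl

theorem pairsOf_single (cs : List Char) (x : Nat × Nat) : pairsOf cs [x] = [] := rfl

theorem pairsOf_cons (cs : List Char) (x y : Nat × Nat) (t : List (Nat × Nat)) :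
    pairsOf cs (x :: y :: t) =
      (if PySem.Chars.strIsspace (PySem.List.slice cs (some (x.2 : Int)) (some (y.1 : Int))) = true
       then [(String.ofList (PySem.List.slice cs (some (y.1 : Int)) (some (y.2 : Int))),
              String.ofList (PySem.List.slice cs (some (x.1 : Int)) (some (x.2 : Int))))]
       else []) ++ pairsOf cs (y :: t) := by
  unfold pairsOf
  simp only [List.tail_cons, List.zip_cons_cons, List.filter_cons]
  by_cases h : PySem.Chars.strIsspace
      (PySem.List.slice cs (some (x.2 : Int)) (some (y.1 : Int))) = true
  · simp [h]
  · simp [h]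

theorem spans_skip_ws (cs : List Char) : ∀ (k a b : Nat), b - a ≤ k → a ≤ b →
    (∀ j, a ≤ j → j < b → wordcharA (cs.getD j ' ') = false) →
    spansLoop cs a [] = spansLoop cs b [] := by
  intro k
  induction k with
  | zero =>
    intro a b h1 h2 _
    have : a = b := by omega
    rw [this]
  | succ k ih =>
    intro a b h1 h2 hall
    by_cases hab : a = b
    · rw [hab]
    · have ha : a < b := by omega
      by_cases hlen : a < cs.length
      · rw [spans_skip cs a hlen (hall a le_rfl ha)]
        exact ih (a + 1) b (by omega) (by omega) (fun j hj1 hj2 => hall j (by omega) hj2)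
      · rw [spans_stop cs a hlen, spans_stop cs b (by omega)]

theorem spans_start_ge (cs : List Char) : ∀ (k i : Nat), cs.length - i ≤ k →
    ∀ s e, (s, e) ∈ spansLoop cs i [] → i ≤ s ∧ s < cs.length := by
  intro k
  induction k with
  | zero =>
    intro i h s e hm
    rw [spans_stop cs i (by omega)] at hm
    simp at hm
  | succ k ih =>
    intro i h s e hm
    by_cases hlen : i < cs.length
    · by_cases hw : wordcharA (cs.getD i ' ') = true
      · rw [spans_word cs i hlen hw] at hm
        rcases List.mem_cons.mp hm with h1 | h1
        · rw [Prod.mk.injEq] at h1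
          omega
        · have hlt := lt_spanEnd cs i hlen hw
          have := ih (spanEnd cs i) (by omega) s e h1
          omega
      · rw [spans_skip cs i hlen (by simpa using hw)] at hm
        have := ih (i + 1) (by omega) s e hm
        omega
    · rw [spans_stop cs i hlen] at hm
      simp at hm

-- the master lemma: A's scanning loop computes B's span pairing
theorem fapLoop_eq (cs : List Char) (pos : Nat) (res : List (String × String)) :
    fapLoop cs pos res = res ++ pairsOf cs (spansLoop cs pos []) := by
  fun_induction fapLoop cs pos res with
  | case1 pos res h2 =>
    rw [nextWord?_none_spans cs pos h2, pairsOf_nil]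
    simp
  | case2 pos res pos2 h2 h3 ih =>
    have hnw := nextWord?_some cs pos pos2 h2
    rw [ih, nextWord?_some_spans cs pos pos2 h2,
        spans_word cs pos2 hnw.2.1 hnw.2.2, ← wordEnd_eq_spanEnd]
    by_cases hL : wordEnd cs pos2 ≥ cs.length
    · rw [spans_stop cs (wordEnd cs pos2) (by omega), pairsOf_nil, pairsOf_single]
    · have hL' : wordEnd cs pos2 < cs.length := by omega
      have hsp : PySem.Chars.isspace (cs.getD (wordEnd cs pos2) ' ') = false := by
        rcases h3 with h | h
        · omega
        · simpa using h
      have hwc : wordcharA (cs.getD (wordEnd cs pos2) ' ') = false := by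
        rcases spanEnd_stop cs pos2 with h | h
        · exfalso; rw [wordEnd_eq_spanEnd] at hL'; omega
        · rw [wordEnd_eq_spanEnd]; exact h
      rw [spans_skip cs (wordEnd cs pos2) hL' hwc]
      cases hrest : spansLoop cs (wordEnd cs pos2 + 1) [] with
      | nil => rw [pairsOf_nil, pairsOf_single]
      | cons hd t =>
        obtain ⟨s2, e2⟩ := hd
        have hs2 := (spans_start_ge cs cs.length (wordEnd cs pos2 + 1) (by omega) s2 e2
          (by rw [hrest]; exact List.mem_cons_self)).1
        rw [pairsOf_cons]
        rw [if_neg]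
        · simp
        · rw [strIsspace_slice_false cs (wordEnd cs pos2) s2 (wordEnd cs pos2)
            le_rfl (by omega) hL' hsp]
          simp
  | case3 pos res pos2 h2 h3 h4 =>
    have hnw := nextWord?_some cs pos pos2 h2
    have h3' := not_or.mp h3
    have hL' : wordEnd cs pos2 < cs.length := by omega
    rw [nextWord?_some_spans cs pos pos2 h2,
        spans_word cs pos2 hnw.2.1 hnw.2.2, ← wordEnd_eq_spanEnd]
    have hws : spansLoop cs (wordEnd cs pos2) [] = spansLoop cs cs.length [] := by
      apply spans_skip_ws cs cs.length (wordEnd cs pos2) cs.length (by omega) (by omega)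
      intro j hj1 hj2
      exact isspace_not_wordchar _ (nextNonWs_ws cs (wordEnd cs pos2) j hj1 (by omega))
    rw [hws, spans_stop cs cs.length (by omega), pairsOf_single]
    simp
  | case4 pos res pos2 h2 h3 h4 h5 ih =>
    have hnw := nextWord?_some cs pos pos2 h2
    have h3' := not_or.mp h3
    have hL' : wordEnd cs pos2 < cs.length := by omega
    have hsp3 : PySem.Chars.isspace (cs.getD (wordEnd cs pos2) ' ') = true := by
      simpa using h3'.2
    have h4' : nextNonWs cs (wordEnd cs pos2) < cs.length := by omega
    have hlt : wordEnd cs pos2 < nextNonWs cs (wordEnd cs pos2) :=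
      lt_nextNonWs cs (wordEnd cs pos2) hL' hsp3
    have hws : spansLoop cs (wordEnd cs pos2) [] =
        spansLoop cs (nextNonWs cs (wordEnd cs pos2)) [] := by
      apply spans_skip_ws cs cs.length (wordEnd cs pos2)
        (nextNonWs cs (wordEnd cs pos2)) (by omega) (by omega)
      intro j hj1 hj2
      exact isspace_not_wordchar _ (nextNonWs_ws cs (wordEnd cs pos2) j hj1 hj2)
    rw [ih, nextWord?_some_spans cs pos pos2 h2,
        spans_word cs pos2 hnw.2.1 hnw.2.2, ← wordEnd_eq_spanEnd, hws,
        spans_word cs (nextNonWs cs (wordEnd cs pos2)) h4' h5, pairsOf_cons]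
    rw [if_pos]
    · rw [← wordEnd_eq_spanEnd]
      simp
    · exact strIsspace_slice_true cs (wordEnd cs pos2) (nextNonWs cs (wordEnd cs pos2))
        hlt (by omega) (fun j hj1 hj2 => nextNonWs_ws cs (wordEnd cs pos2) j hj1 hj2)
  | case5 pos res pos2 h2 h3 h4 h5 ih =>
    have hnw := nextWord?_some cs pos pos2 h2
    have h3' := not_or.mp h3
    have hL' : wordEnd cs pos2 < cs.length := by omega
    have h4' : nextNonWs cs (wordEnd cs pos2) < cs.length := by omega
    have h5' : wordcharA (cs.getD (nextNonWs cs (wordEnd cs pos2)) ' ') = false := by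
      simpa using h5
    have hle := le_nextNonWs cs (wordEnd cs pos2)
    have hsp4 : PySem.Chars.isspace (cs.getD (nextNonWs cs (wordEnd cs pos2)) ' ') = false := by
      rcases nextNonWs_stop cs (wordEnd cs pos2) with h | h
      · omega
      · exact h
    have hws : spansLoop cs (wordEnd cs pos2) [] =
        spansLoop cs (nextNonWs cs (wordEnd cs pos2) + 1) [] := by
      apply spans_skip_ws cs cs.length (wordEnd cs pos2)
        (nextNonWs cs (wordEnd cs pos2) + 1) (by omega)
        (by have := le_nextNonWs cs (wordEnd cs pos2); omega)
      intro j hj1 hj2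
      by_cases hj : j = nextNonWs cs (wordEnd cs pos2)
      · rw [hj]; exact h5'
      · exact isspace_not_wordchar _ (nextNonWs_ws cs (wordEnd cs pos2) j hj1 (by omega))
    have hws4 : spansLoop cs (nextNonWs cs (wordEnd cs pos2)) [] =
        spansLoop cs (nextNonWs cs (wordEnd cs pos2) + 1) [] :=
      spans_skip cs (nextNonWs cs (wordEnd cs pos2)) h4' h5'
    rw [ih, nextWord?_some_spans cs pos pos2 h2,
        spans_word cs pos2 hnw.2.1 hnw.2.2, ← wordEnd_eq_spanEnd, hws, hws4]
    cases hrest : spansLoop cs (nextNonWs cs (wordEnd cs pos2) + 1) [] with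
    | nil => rw [pairsOf_nil, pairsOf_single]
    | cons hd t =>
      obtain ⟨s2, e2⟩ := hd
      have hs2 := (spans_start_ge cs cs.length (nextNonWs cs (wordEnd cs pos2) + 1)
        (by omega) s2 e2 (by rw [hrest]; exact List.mem_cons_self)).1
      rw [pairsOf_cons, if_neg]
      · simp
      · rw [strIsspace_slice_false cs (wordEnd cs pos2) s2
          (nextNonWs cs (wordEnd cs pos2)) (by omega) (by omega) h4' hsp4]
        simp

-- ===== VERDICT (by name: the statement is the Claim_ definition above) =====
theorem find_alias_pairs_spec : Claim_equal_find_alias_pairs := by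
  unfold Claim_equal_find_alias_pairs Spec_find_alias_pairs
  intro text _
  unfold find_alias_pairs find_alias_pairs_alt
  rw [fapLoop_eq]
  simp
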